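-- pv_equiv track=rewrite | github.com/StarTux/DailyCodingProblem | 013-2019-03-17-Substring.py | hasChars
-- ===== SOURCE A (Python) =====
-- def hasChars(k, s):
--     done = set()
--     total = 0
--     for c in s:
--         if c in done: continue
--         done.add(c)
--         total += 1
--         if total > k: return False
--     return total == k
-- ===== SOURCE B (Python) =====
-- def hasChars(k, s):
--     count = 0
--     prev = None
--     for c in sorted(s):
--         if c != prev:
--             count += 1
--         prev = c
--     return count == k
-- ===== Notes on version B (the rewrite author's own statement) =====
-- stated objective: alternative
-- what changed: Replaces the set-membership loop with early exit by sorting the characters and counting distinct ones in a single adjacent-difference scan, then comparing the count with k.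
import Mathlib
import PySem

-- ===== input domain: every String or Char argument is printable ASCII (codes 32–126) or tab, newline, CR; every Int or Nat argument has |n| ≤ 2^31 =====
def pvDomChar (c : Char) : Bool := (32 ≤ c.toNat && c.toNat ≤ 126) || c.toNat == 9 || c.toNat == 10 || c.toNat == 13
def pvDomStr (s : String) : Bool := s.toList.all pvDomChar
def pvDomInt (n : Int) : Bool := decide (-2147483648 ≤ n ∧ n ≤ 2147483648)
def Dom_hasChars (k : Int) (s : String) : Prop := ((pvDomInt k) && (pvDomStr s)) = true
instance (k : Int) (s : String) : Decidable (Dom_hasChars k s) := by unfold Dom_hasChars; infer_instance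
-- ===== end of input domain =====

-- B sorts the characters and counts distinct ones by an adjacent-difference scan instead of A's set-membership loop; same result, alternative algorithm.


-- ===== PORT A =====
-- for c in s: skip if c in done; else add, total += 1, early-return False if total > k
def hasCharsLoop (k : Int) (cs : List Char) (done : PySem.Set Char) (total : Int) : Bool :=
  match cs with
  | [] => decide (total = k)
  | c :: rest =>
    if PySem.Set.contains done c then hasCharsLoop k rest done total
    else if total + 1 > k then false
    else hasCharsLoop k rest (PySem.Set.add done c) (total + 1)

def hasChars (k : Int) (s : String) : Bool :=
  hasCharsLoop k s.toList PySem.Set.empty 0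

-- ===== PORT B =====
-- for c in sorted(s): count += 1 when c differs from the previous character
def hasCharsAltLoop (count : Int) (prev : Option Char) (cs : List Char) : Int :=
  match cs with
  | [] => count
  | c :: rest =>
    hasCharsAltLoop (if some c ≠ prev then count + 1 else count) (some c) rest

def hasChars_alt (k : Int) (s : String) : Bool :=
  decide (hasCharsAltLoop 0 none (PySem.List.sorted s.toList (fun x => x) false) = k)

-- ===== PRECONDITION & SPEC =====
def Spec_hasChars (k : Int) (s : String) (out : Bool) : Prop := out = hasChars_alt k s
instance (k : Int) (s : String) (out : Bool) : Decidable (Spec_hasChars k s out) := by unfold Spec_hasChars; infer_instance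

-- ===== CLAIM (what is proved, stated in full; the proofs are below) =====
def Claim_equal_hasChars : Prop := ∀ (k : Int) (s : String), Dom_hasChars k s → Spec_hasChars k s (hasChars k s)

-- ===== LEMMAS AND PROOFS =====

theorem length_le_foldl_add (cs : List Char) (s : PySem.Set Char) :
    s.length ≤ (cs.foldl PySem.Set.add s).length := by
  induction cs generalizing s with
  | nil => simp
  | cons c rest ih =>
    refine le_trans ?_ (ih (PySem.Set.add s c))
    by_cases h : c ∈ s
    · simp [PySem.Set.add, h]
    · simp [PySem.Set.add, h]

theorem hasCharsLoop_eq (cs : List Char) (k total : Int) (done : PySem.Set Char) :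
    hasCharsLoop k cs done total =
      decide (total + ((cs.foldl PySem.Set.add done).length : Int) - (done.length : Int) = k) := by
  induction cs generalizing done total with
  | nil => simp [hasCharsLoop]
  | cons c rest ih =>
    by_cases h : c ∈ done
    · have hc : PySem.Set.contains done c = true := (PySem.Set.contains_iff done c).mpr h
      have hadd : PySem.Set.add done c = done := by simp [PySem.Set.add, h]
      simp [hasCharsLoop, hc, hadd, ih, h]
    · have hc : PySem.Set.contains done c = false := by
        simp only [Bool.not_eq_true] at *
        exact Bool.not_eq_true _ ▸ (by simpa [PySem.Set.contains_iff] using h)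
      have hadd : PySem.Set.add done c = done ++ [c] := by simp [PySem.Set.add, h]
      by_cases hk : total + 1 > k
      · have hge := length_le_foldl_add rest (PySem.Set.add done c)
        have hlen : (PySem.Set.add done c).length = done.length + 1 := by simp [hadd]
        simp only [hasCharsLoop, hc, if_pos hk, List.foldl_cons, Bool.false_eq_true, if_false]
        have : ¬ (total + ((rest.foldl PySem.Set.add (PySem.Set.add done c)).length : Int)
            - (done.length : Int) = k) := by
          rw [hlen] at hge
          omega
        simp [this]
      · have hlen : (PySem.Set.add done c).length = done.length + 1 := by simp [hadd]
        simp only [hasCharsLoop, hc, if_neg hk, List.foldl_cons, ih, Bool.false_eq_true, if_false]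
        rw [hlen]
        congr 1
        simp only [eq_iff_iff]
        constructor <;> intro hh <;> omega

theorem toFinset_ofList (l : List Char) :
    (PySem.Set.ofList l).toFinset = l.toFinset := by
  ext x
  simp [List.mem_toFinset, PySem.Set.mem_ofList]

theorem length_ofList_eq_card (l : List Char) :
    (PySem.Set.ofList l).length = l.toFinset.card := by
  rw [← toFinset_ofList, List.toFinset_card_of_nodup (PySem.Set.nodup_ofList l)]

theorem hasChars_eq_card (k : Int) (s : String) :
    hasChars k s = decide ((s.toList.toFinset.card : Int) = k) := by
  have h := hasCharsLoop_eq s.toList k 0 PySem.Set.empty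
  have hfold : s.toList.foldl PySem.Set.add PySem.Set.empty = PySem.Set.ofList s.toList :=
    (PySem.Set.ofList_eq_foldl s.toList).symm
  rw [hasChars, h, hfold, length_ofList_eq_card]
  norm_num

theorem card_insert_eq_card_erase_succ (d : Char) (S : Finset Char) :
    (insert d S).card = (S.erase d).card + 1 := by
  by_cases h : d ∈ S
  · rw [Finset.card_insert_of_mem h, Finset.card_erase_add_one h]
  · rw [Finset.card_insert_of_notMem h, Finset.erase_eq_of_notMem h]

theorem perm_toFinset {l1 l2 : List Char} (h : l1.Perm l2) : l1.toFinset = l2.toFinset := by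
  ext x
  simp [List.mem_toFinset, h.mem_iff]

theorem altLoop_some (cs : List Char) (c : Char) (count : Int)
    (hp : cs.Pairwise (· ≤ ·)) (hb : ∀ x ∈ cs, c ≤ x) :
    hasCharsAltLoop count (some c) cs = count + ((cs.toFinset.erase c).card : Int) := by
  induction cs generalizing c count with
  | nil => simp [hasCharsAltLoop]
  | cons d rest ih =>
    have hp' : rest.Pairwise (· ≤ ·) := (List.pairwise_cons.mp hp).2
    have hd : ∀ x ∈ rest, d ≤ x := (List.pairwise_cons.mp hp).1
    by_cases hdc : d = c
    · subst hdc
      have : hasCharsAltLoop count (some d) (d :: rest) = hasCharsAltLoop count (some d) rest := by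
        simp [hasCharsAltLoop]
      rw [this, ih d count hp' hd]
      congr 2
      rw [List.toFinset_cons, Finset.erase_insert_eq_erase]
    · have hlt : c < d := lt_of_le_of_ne (hb d (by simp)) (Ne.symm hdc)
      have hstep : hasCharsAltLoop count (some c) (d :: rest)
          = hasCharsAltLoop (count + 1) (some d) rest := by
        simp [hasCharsAltLoop, hdc]
      rw [hstep, ih d (count + 1) hp' hd]
      have hcnot : c ∉ (d :: rest).toFinset := by
        simp only [List.toFinset_cons, Finset.mem_insert, List.mem_toFinset]
        push_neg
        exact ⟨Ne.symm hdc, fun hc => absurd (hd c hc) (not_le.mpr hlt)⟩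
      rw [Finset.erase_eq_of_notMem hcnot, List.toFinset_cons]
      rw [card_insert_eq_card_erase_succ]
      push_cast
      ring

theorem altLoop_none (cs : List Char) (count : Int) (hp : cs.Pairwise (· ≤ ·)) :
    hasCharsAltLoop count none cs = count + (cs.toFinset.card : Int) := by
  cases cs with
  | nil => simp [hasCharsAltLoop]
  | cons d rest =>
    have hp' : rest.Pairwise (· ≤ ·) := (List.pairwise_cons.mp hp).2
    have hd : ∀ x ∈ rest, d ≤ x := (List.pairwise_cons.mp hp).1
    have hstep : hasCharsAltLoop count none (d :: rest)
        = hasCharsAltLoop (count + 1) (some d) rest := by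
      simp [hasCharsAltLoop]
    rw [hstep, altLoop_some rest d (count + 1) hp' hd, List.toFinset_cons]
    rw [card_insert_eq_card_erase_succ]
    push_cast
    ring

theorem hasChars_alt_eq_card (k : Int) (s : String) :
    hasChars_alt k s = decide ((s.toList.toFinset.card : Int) = k) := by
  have hp : (PySem.List.sorted s.toList (fun x => x) false).Pairwise (· ≤ ·) := by
    have := PySem.List.sorted_pairwise s.toList (fun x => x)
    simpa using this
  have hperm : (PySem.List.sorted s.toList (fun x => x) false).Perm s.toList :=
    PySem.List.sorted_perm s.toList (fun x => x) false
  rw [hasChars_alt, altLoop_none _ 0 hp, perm_toFinset hperm]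
  norm_num

-- ===== VERDICT (by name: the statement is the Claim_ definition above) =====
theorem hasChars_spec : Claim_equal_hasChars := by
  intro k s _
  unfold Spec_hasChars
  rw [hasChars_eq_card, hasChars_alt_eq_card]
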